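-- pv_equiv track=rewrite | github.com/liuyingxuvka/FlowPilot | flowpilot_cockpit/models.py | status_health
-- ===== SOURCE A (Python) =====
-- STATUS_SEVERITY = {
--     "blocked": 4,
--     "failed": 4,
--     "error": 4,
--     "degraded": 3,
--     "warning": 3,
--     "running": 2,
--     "active": 2,
--     "in_progress": 2,
--     "complete": 1,
--     "completed": 1,
--     "succeeded": 1,
--     "delivered": 1,
--     "pass": 1,
--     "pending": 0,
--     "new": 0,
--     "unknown": 0,
-- }
--
-- def status_health(statuses: list[str], findings: list[str]) -> str:
--     if findings:
--         return "degraded"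
--     if any(STATUS_SEVERITY.get(status, 0) >= 4 for status in statuses):
--         return "blocked"
--     if any(status in {"degraded", "warning"} for status in statuses):
--         return "degraded"
--     return "ok"
-- ===== SOURCE B (Python) =====
-- STATUS_SEVERITY = {
--     "blocked": 4,
--     "failed": 4,
--     "error": 4,
--     "degraded": 3,
--     "warning": 3,
--     "running": 2,
--     "active": 2,
--     "in_progress": 2,
--     "complete": 1,
--     "completed": 1,
--     "succeeded": 1,
--     "delivered": 1,
--     "pass": 1,
--     "pending": 0,
--     "new": 0,
--     "unknown": 0,
-- }
--
-- def status_health(statuses: list[str], findings: list[str]) -> str: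
--     m = max((STATUS_SEVERITY.get(s, 0) for s in statuses), default=0)
--     if findings:
--         return "degraded"
--     if m >= 4:
--         return "blocked"
--     if m >= 3:
--         return "degraded"
--     return "ok"
-- ===== Notes on version B (the rewrite author's own statement) =====
-- stated objective: simpler
-- what changed: B folds the statuses into one aggregate maximum severity and then thresholds it (m>=4 blocked, m>=3 degraded), replacing A's two separate any-scans (one over severities, one a membership test against the literal set {'degraded','warning'}).
import Mathlib
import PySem

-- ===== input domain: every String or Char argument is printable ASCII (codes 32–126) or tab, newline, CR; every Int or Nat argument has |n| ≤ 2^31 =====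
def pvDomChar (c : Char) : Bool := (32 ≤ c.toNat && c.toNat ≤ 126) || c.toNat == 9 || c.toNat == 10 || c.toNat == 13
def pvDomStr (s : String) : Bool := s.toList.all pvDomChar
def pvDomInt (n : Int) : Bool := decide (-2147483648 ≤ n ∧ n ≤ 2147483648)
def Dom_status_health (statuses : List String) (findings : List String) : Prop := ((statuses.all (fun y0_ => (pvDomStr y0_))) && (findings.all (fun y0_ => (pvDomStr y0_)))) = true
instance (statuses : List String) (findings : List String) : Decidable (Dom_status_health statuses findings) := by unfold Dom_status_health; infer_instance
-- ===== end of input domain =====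

-- B replaces A's two any-scans (severity ≥ 4; membership in {"degraded","warning"}) by one
-- aggregate maximum severity that is then thresholded; objective: simpler.

-- STATUS_SEVERITY.get(s, 0), the module dict lookup, ported by hand as an if-chain (exact:
-- the dict is a fixed literal with distinct keys, so first-match lookup is this chain).
def pySeverity (s : String) : Int :=
  if s = "blocked" then 4
  else if s = "failed" then 4
  else if s = "error" then 4
  else if s = "degraded" then 3
  else if s = "warning" then 3
  else if s = "running" then 2
  else if s = "active" then 2
  else if s = "in_progress" then 2
  else if s = "complete" then 1
  else if s = "completed" then 1
  else if s = "succeeded" then 1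
  else if s = "delivered" then 1
  else if s = "pass" then 1
  else if s = "pending" then 0
  else if s = "new" then 0
  else if s = "unknown" then 0
  else 0

-- ===== PORT A =====
def status_health (statuses : List String) (findings : List String) : String :=
  if findings ≠ [] then "degraded"
  else if statuses.any (fun s => decide (pySeverity s ≥ 4)) then "blocked"
  else if statuses.any (fun s => s == "degraded" || s == "warning") then "degraded"
  else "ok"

-- ===== PORT B =====
def status_health_alt (statuses : List String) (findings : List String) : String :=
  let m := statuses.foldl (fun a s => max a (pySeverity s)) 0
  if findings ≠ [] then "degraded"
  else if m ≥ 4 then "blocked"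
  else if m ≥ 3 then "degraded"
  else "ok"

-- ===== PRECONDITION & SPEC =====
def Spec_status_health (statuses : List String) (findings : List String) (out : String) : Prop := out = status_health_alt statuses findings
instance (statuses : List String) (findings : List String) (out : String) : Decidable (Spec_status_health statuses findings out) := by unfold Spec_status_health; infer_instance

-- ===== CLAIM (what is proved, stated in full; the proofs are below) =====
def Claim_equal_status_health : Prop := ∀ (statuses : List String) (findings : List String), Dom_status_health statuses findings → Spec_status_health statuses findings (status_health statuses findings)

-- ===== LEMMAS AND PROOFS =====

theorem pySeverity_three_iff (s : String) :
    (3 ≤ pySeverity s ∧ pySeverity s < 4) ↔ (s = "degraded" ∨ s = "warning") := by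
  by_cases h0 : s = "blocked"
  · subst h0; decide
  by_cases h1 : s = "failed"
  · subst h1; decide
  by_cases h2 : s = "error"
  · subst h2; decide
  by_cases h3 : s = "degraded"
  · subst h3; decide
  by_cases h4 : s = "warning"
  · subst h4; decide
  by_cases h5 : s = "running"
  · subst h5; decide
  by_cases h6 : s = "active"
  · subst h6; decide
  by_cases h7 : s = "in_progress"
  · subst h7; decide
  by_cases h8 : s = "complete"
  · subst h8; decide
  by_cases h9 : s = "completed"
  · subst h9; decide
  by_cases h10 : s = "succeeded"
  · subst h10; decide
  by_cases h11 : s = "delivered"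
  · subst h11; decide
  by_cases h12 : s = "pass"
  · subst h12; decide
  by_cases h13 : s = "pending"
  · subst h13; decide
  by_cases h14 : s = "new"
  · subst h14; decide
  by_cases h15 : s = "unknown"
  · subst h15; decide
  · simp [pySeverity, h0, h1, h2, h3, h4, h5, h6, h7, h8, h9, h10, h11, h12, h13, h14, h15]

theorem foldl_max_ge (l : List String) (a k : Int) :
    k ≤ l.foldl (fun a s => max a (pySeverity s)) a ↔ k ≤ a ∨ ∃ s ∈ l, k ≤ pySeverity s := by
  induction l generalizing a with
  | nil => simp
  | cons x xs ih =>
    simp only [List.foldl_cons, ih, le_max_iff, List.mem_cons]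
    constructor
    · rintro (( h | h) | ⟨s, hs, h⟩)
      · exact Or.inl h
      · exact Or.inr ⟨x, Or.inl rfl, h⟩
      · exact Or.inr ⟨s, Or.inr hs, h⟩
    · rintro (h | ⟨s, (rfl | hs), h⟩)
      · exact Or.inl (Or.inl h)
      · exact Or.inl (Or.inr h)
      · exact Or.inr ⟨s, hs, h⟩

-- ===== VERDICT (by name: the statement is the Claim_ definition above) =====
theorem status_health_spec : Claim_equal_status_health := by
  intro statuses findings _
  unfold Spec_status_health status_health status_health_alt
  by_cases hf : findings = []
  · simp only [hf, ne_eq, not_true_eq_false, if_false]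
    by_cases h4 : ∃ s ∈ statuses, (4 : Int) ≤ pySeverity s
    · have hA : statuses.any (fun s => decide (pySeverity s ≥ 4)) = true := by
        simp only [List.any_eq_true, decide_eq_true_eq]; exact h4
      have hB : (4 : Int) ≤ statuses.foldl (fun a s => max a (pySeverity s)) 0 := by
        rw [foldl_max_ge]; exact Or.inr h4
      simp [hA, hB]
    · have hA : statuses.any (fun s => decide (pySeverity s ≥ 4)) = false := by
        simp only [List.any_eq_false, decide_eq_true_eq]
        intro s hs h; exact h4 ⟨s, hs, h⟩
      have hB : ¬ (4 : Int) ≤ statuses.foldl (fun a s => max a (pySeverity s)) 0 := by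
        rw [foldl_max_ge]; push Not; exact ⟨by norm_num, fun s hs => lt_of_not_ge (fun h => h4 ⟨s, hs, h⟩)⟩
      by_cases h3 : ∃ s ∈ statuses, s = "degraded" ∨ s = "warning"
      · have hA3 : statuses.any (fun s => s == "degraded" || s == "warning") = true := by
          simp only [List.any_eq_true, Bool.or_eq_true, beq_iff_eq]; exact h3
        have hB3 : (3 : Int) ≤ statuses.foldl (fun a s => max a (pySeverity s)) 0 := by
          rw [foldl_max_ge]
          obtain ⟨s, hs, h⟩ := h3
          exact Or.inr ⟨s, hs, ((pySeverity_three_iff s).2 h).1⟩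
        simp [hA, hA3, hB, hB3]
      · have hA3 : statuses.any (fun s => s == "degraded" || s == "warning") = false := by
          simp only [List.any_eq_false, Bool.or_eq_true, beq_iff_eq]
          intro s hs h; exact h3 ⟨s, hs, h⟩
        have hB3 : ¬ (3 : Int) ≤ statuses.foldl (fun a s => max a (pySeverity s)) 0 := by
          rw [foldl_max_ge]; push Not
          refine ⟨by norm_num, fun s hs => ?_⟩
          by_contra h; push Not at h
          have h4' : pySeverity s < 4 := lt_of_not_ge (fun hc => h4 ⟨s, hs, hc⟩)
          exact h3 ⟨s, hs, (pySeverity_three_iff s).1 ⟨h, h4'⟩⟩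
        simp [hA, hA3, hB, hB3]
  · simp [hf]
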